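-- pv_equiv track=rewrite | github.com/yooning92/programers | python/컨트롤 제트.py | solution
-- ===== SOURCE A (Python) =====
-- def solution(s):
--     answer = []
--     for i in s.split():
--         if i == "Z":
--             answer.pop()
--             continue
--         answer.append(int(i))
--     return sum(answer)
-- ===== SOURCE B (Python) =====
-- def solution(s):
--     total = 0
--     skip = 0
--     for tok in reversed(s.split()):
--         if tok == "Z":
--             skip += 1
--         else:
--             n = int(tok)
--             if skip > 0:
--                 skip -= 1
--             else:
--                 total += n
--     return total
-- ===== Notes on version B (the rewrite author's own statement) =====
-- stated objective: alternative
-- what changed: B scans the tokens right-to-left keeping only an integer total and a skip counter (a 'Z' increments skip, a number is discarded while skip>0), replacing A's stack list with O(1) extra state; Pre_ excludes exactly the inputs where A raises (a non-int token -> ValueError, or a prefix with more 'Z' tokens than numbers -> IndexError from popping an empty list; B naturally returns the surviving sum there).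
-- outside the precondition, e.g. on solution('Z'): A raises IndexError, B returns 0; on solution('1 x'): A raises ValueError, B raises ValueError
import Mathlib
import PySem

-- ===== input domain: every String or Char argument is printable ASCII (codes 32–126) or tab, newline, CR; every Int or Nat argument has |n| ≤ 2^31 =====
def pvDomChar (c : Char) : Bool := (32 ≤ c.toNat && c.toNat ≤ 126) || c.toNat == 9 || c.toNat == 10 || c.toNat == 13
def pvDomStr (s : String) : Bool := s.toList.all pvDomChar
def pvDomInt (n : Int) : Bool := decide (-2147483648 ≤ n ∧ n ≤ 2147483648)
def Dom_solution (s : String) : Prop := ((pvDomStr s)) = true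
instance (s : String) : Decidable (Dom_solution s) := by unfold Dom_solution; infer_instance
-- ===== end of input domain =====

-- B replaces A's explicit stack by a right-to-left scan with an integer total and a skip counter (O(1) extra state); return value only.

-- ===== PORT A =====
-- A's loop: stack of ints; "Z" pops (IndexError when empty → none), else append int(i); finally sum.
def aStep (acc : Option (List Int)) (t : String) : Option (List Int) :=
  acc.bind fun answer =>
    if t = "Z" then (PySem.List.pop? answer (-1)).map (fun r => r.2)
    else (PySem.Int.ofStr? t).map (fun n => answer ++ [n])

def solution (s : String) : Int :=
  match (PySem.Str.split₀ s).foldl aStep (some []) with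
  | some answer => answer.sum
  | none => 0      -- A raised here; excluded by Pre_solution

-- ===== PORT B =====
-- B's loop over reversed(tokens): "Z" bumps skip; a number is parsed, then discarded if skip>0 else added.
def bStep (acc : Option (Int × Int)) (t : String) : Option (Int × Int) :=
  acc.bind fun p =>
    if t = "Z" then some (p.1, p.2 + 1)
    else (PySem.Int.ofStr? t).map (fun n => if p.2 > 0 then (p.1, p.2 - 1) else (p.1 + n, p.2))

def solution_alt (s : String) : Int :=
  match (PySem.Str.split₀ s).reverse.foldl bStep (some (0, 0)) with
  | some (tot, _) => tot
  | none => 0      -- B raised (ValueError); excluded by Pre_solution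

-- ===== PRECONDITION & SPEC =====
-- Pre_ admits exactly the inputs on which A returns: every non-"Z" token parses as an int
-- (else ValueError) and no prefix holds more "Z" tokens than numbers (else pop from empty list).
def Pre_solution (s : String) : Prop :=
  (∀ t ∈ PySem.Str.split₀ s, t ≠ "Z" → (PySem.Int.ofStr? t).isSome = true) ∧
  (∀ k, k ≤ (PySem.Str.split₀ s).length → 2 * ((PySem.Str.split₀ s).take k).count "Z" ≤ k)

instance (s : String) : Decidable (Pre_solution s) := by unfold Pre_solution; infer_instance

def pvWitness_solution : String := "1 2 Z 3"

def Spec_solution (s : String) (out : Int) : Prop := out = solution_alt s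
instance (s : String) (out : Int) : Decidable (Spec_solution s out) := by unfold Spec_solution; infer_instance

-- ===== CLAIM (what is proved, stated in full; the proofs are below) =====
def Claim_equal_solution : Prop := ∀ (s : String), Dom_solution s → Pre_solution s → Spec_solution s (solution s)

-- ===== LEMMAS AND PROOFS =====

theorem bFold_some (ts : List String)
    (hp : ∀ t ∈ ts, t ≠ "Z" → (PySem.Int.ofStr? t).isSome = true) :
    ∃ tot skip, ts.foldr (fun t acc => bStep acc t) (some (0, 0)) = some (tot, skip) := by
  induction ts with
  | nil => exact ⟨0, 0, rfl⟩
  | cons t ts ih =>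
    obtain ⟨tot, skip, htot⟩ := ih (fun u hu => hp u (List.mem_cons_of_mem _ hu))
    by_cases hz : t = "Z"
    · exact ⟨tot, skip + 1, by rw [List.foldr_cons, htot]; simp [bStep, hz]⟩
    · obtain ⟨n, hn⟩ := Option.isSome_iff_exists.mp (hp t (List.mem_cons_self ..) hz)
      by_cases hs : skip > 0
      · exact ⟨tot, skip - 1, by rw [List.foldr_cons, htot]; simp [bStep, hz, hn, hs]⟩
      · exact ⟨tot + n, skip, by rw [List.foldr_cons, htot]; simp [bStep, hz, hn, hs]⟩

-- the skip counter B is left with after a full scan of toks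
def skipOf : List String → Int
  | [] => 0
  | t :: ts => if t = "Z" then skipOf ts + 1 else if skipOf ts > 0 then skipOf ts - 1 else skipOf ts

theorem skipOf_nonneg (ts : List String) : 0 ≤ skipOf ts := by
  induction ts with
  | nil => simp [skipOf]
  | cons t ts ih => simp only [skipOf]; split_ifs <;> omega

theorem bFold_skip (ts : List String) (tot skip : Int)
    (h : ts.foldr (fun t acc => bStep acc t) (some (0, 0)) = some (tot, skip)) :
    skip = skipOf ts := by
  induction ts generalizing tot skip with
  | nil => simp [skipOf] at h ⊢; omega
  | cons t ts ih =>
    rw [List.foldr_cons] at h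
    cases hrec : ts.foldr (fun t acc => bStep acc t) (some (0, 0)) with
    | none => rw [hrec] at h; simp [bStep] at h
    | some p =>
      rw [hrec] at h
      have hp := ih p.1 p.2 (by rw [hrec])
      simp only [bStep, Option.bind_some] at h
      by_cases hz : t = "Z"
      · rw [if_pos hz] at h
        simp at h
        simp [skipOf, hz, ← hp, ← h.2]
      · rw [if_neg hz] at h
        cases hn : PySem.Int.ofStr? t with
        | none => rw [hn] at h; simp at h
        | some n =>
          rw [hn] at h
          simp only [Option.map_some, Option.some.injEq] at h
          simp only [skipOf, if_neg hz, ← hp]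
          split_ifs at h ⊢ <;> simp [Prod.ext_iff] at h <;> omega

-- ballot lemma: a bound on every prefix deficit bounds the final skip counter
theorem skipOf_le (ts : List String) (c : Int)
    (h : ∀ k, k ≤ ts.length → 2 * (((ts.take k).count "Z" : Int)) - k ≤ c) :
    skipOf ts ≤ c := by
  induction ts generalizing c with
  | nil => simpa [skipOf] using h 0 (by simp)
  | cons t ts ih =>
    have hc0 : (0 : Int) ≤ c := by simpa using h 0 (by simp)
    by_cases hz : t = "Z"
    · have := ih (c - 1) (fun j hj => by
        have := h (j + 1) (by simpa using Nat.succ_le_succ hj)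
        simp [hz] at this ⊢
        omega)
      simp only [skipOf, hz]
      omega
    · have := ih (c + 1) (fun j hj => by
        have := h (j + 1) (by simpa using Nat.succ_le_succ hj)
        simp [hz] at this ⊢
        omega)
      have hnn := skipOf_nonneg ts
      simp only [skipOf, if_neg hz]
      split_ifs <;> omega

-- the crux: A's stack fold from stack st equals B's right fold, B's leftover skip popping from st
theorem main_lemma (ts : List String) (st : List Int) (tot skip : Int)
    (hb : ts.foldr (fun t acc => bStep acc t) (some (0, 0)) = some (tot, skip))
    (hlen : skip.toNat ≤ st.length) :
    ∃ fin, ts.foldl aStep (some st) = some fin ∧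
      fin.sum = tot + (st.take (st.length - skip.toNat)).sum := by
  induction ts generalizing st tot skip with
  | nil =>
    simp at hb
    refine ⟨st, rfl, ?_⟩
    rw [← hb.1, ← hb.2]
    simp
  | cons t ts ih =>
    rw [List.foldr_cons] at hb
    cases hrec : ts.foldr (fun t acc => bStep acc t) (some (0, 0)) with
    | none => rw [hrec] at hb; simp [bStep] at hb
    | some p =>
      obtain ⟨tot', skip'⟩ := p
      have hs' : 0 ≤ skip' := by
        rw [bFold_skip ts tot' skip' hrec]; exact skipOf_nonneg ts
      rw [hrec] at hb
      simp only [bStep, Option.bind_some] at hb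
      by_cases hz : t = "Z"
      · rw [if_pos hz] at hb
        simp at hb
        have hst : st ≠ [] := by
          intro h0; subst h0; simp at hlen; omega
        have hpop : PySem.List.pop? st (-1) = some (st.getLast hst, st.dropLast) := by
          conv_lhs => rw [← List.dropLast_append_getLast hst]
          exact PySem.List.pop?_last _ _
        obtain ⟨fin, hfin, hsum⟩ := ih st.dropLast tot' skip' hrec
          (by simp [List.length_dropLast]; omega)
        have hTake : st.dropLast.take (st.dropLast.length - skip'.toNat)
            = st.take (st.length - skip.toNat) := by
          rw [List.dropLast_eq_take, List.take_take]
          congr 1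
          simp
          omega
        refine ⟨fin, ?_, ?_⟩
        · simp [List.foldl_cons, aStep, hz, hpop, hfin]
        · rw [hsum, hTake, hb.1]
      · rw [if_neg hz] at hb
        cases hn : PySem.Int.ofStr? t with
        | none => rw [hn] at hb; simp at hb
        | some n =>
          rw [hn] at hb
          simp only [Option.map_some, Option.some.injEq] at hb
          by_cases hpos : skip' > 0
          · rw [if_pos hpos] at hb
            simp only [Prod.mk.injEq] at hb
            obtain ⟨hb1, hb2⟩ := hb
            obtain ⟨fin, hfin, hsum⟩ := ih (st ++ [n]) tot' skip' hrec
              (by simp; omega)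
            have hTake : (st ++ [n]).take ((st ++ [n]).length - skip'.toNat)
                = st.take (st.length - skip.toNat) := by
              rw [List.take_append_of_le_length (by simp; omega)]
              congr 1
              simp
              omega
            refine ⟨fin, ?_, ?_⟩
            · simp [List.foldl_cons, aStep, hz, hn, hfin]
            · rw [hsum, hTake, hb1]
          · rw [if_neg hpos] at hb
            have hz0 : skip' = 0 := le_antisymm (by omega) hs'
            simp only [Prod.mk.injEq] at hb
            obtain ⟨hb1, hb2⟩ := hb
            obtain ⟨fin, hfin, hsum⟩ := ih (st ++ [n]) tot' skip' hrec (by simp; omega)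
            refine ⟨fin, ?_, ?_⟩
            · simp [List.foldl_cons, aStep, hz, hn, hfin]
            · rw [hsum, ← hb1, ← hb2, hz0]
              simp
              ring

-- ===== VERDICT (by name: the statement is the Claim_ definition above) =====
theorem solution_spec : Claim_equal_solution := by
  intro s _hdom hpre
  obtain ⟨hparse, hcount⟩ := hpre
  set ts := PySem.Str.split₀ s with hts
  obtain ⟨tot, skip, htot⟩ := bFold_some ts hparse
  have hskip0 : skip = 0 := by
    rw [bFold_skip ts tot skip htot]
    have hle := skipOf_le ts 0 (fun k hk => by
      have := hcount k hk
      omega)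
    have := skipOf_nonneg ts
    omega
  subst hskip0
  obtain ⟨fin, hfin, hsum⟩ := main_lemma ts [] tot 0 htot (by simp)
  unfold Spec_solution solution solution_alt
  rw [List.foldl_reverse, ← hts, htot, hfin]
  simp [hsum]
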